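-- pv_equiv track=rewrite | github.com/evankroz/Codewars-Python-Solutions | 6kyu /Data Reverse.py | data_reverse
-- ===== SOURCE A (Python) =====
-- def data_reverse(data):
--     n=[]
--     res=[]
--     for i in range(0,len(data),8):
-- 	    n.append(data[i:i + 8])
--     for i in reversed(n):
-- 	    res.extend(i)
--     return res
-- ===== SOURCE B (Python) =====
-- def data_reverse(data):
--     n = len(data)
--     out = [0] * n
--     for s in range(0, n, 8):
--         e = min(s + 8, n)
--         out[n - e:n - s] = data[s:e]
--     return out
-- ===== Notes on version B (the rewrite author's own statement) =====
-- stated objective: alternative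
-- what changed: Instead of A's two staged passes (collect the 8-byte chunks into a list, then reverse it and flatten), B preallocates the output and, in one forward pass, writes each chunk via slice assignment at its arithmetically computed destination offset n-e, so no chunk list and no reversal exist at all.
import Mathlib
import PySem

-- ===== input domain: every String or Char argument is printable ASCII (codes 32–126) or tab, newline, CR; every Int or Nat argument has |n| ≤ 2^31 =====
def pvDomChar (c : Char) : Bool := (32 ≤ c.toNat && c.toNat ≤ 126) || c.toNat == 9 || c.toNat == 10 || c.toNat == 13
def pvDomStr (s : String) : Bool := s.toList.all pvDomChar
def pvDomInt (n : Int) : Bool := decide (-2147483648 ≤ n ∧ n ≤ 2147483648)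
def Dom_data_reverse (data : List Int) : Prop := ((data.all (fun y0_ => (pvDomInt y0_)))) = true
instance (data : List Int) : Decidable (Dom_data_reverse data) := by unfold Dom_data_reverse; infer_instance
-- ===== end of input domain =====

-- B never builds or reverses a chunk list: it preallocates the output and writes each chunk
-- directly at its computed destination offset in one forward pass (objective: alternative).
-- ===== PORT A =====
def data_reverse (data : List Int) : List Int :=
  let n := (PySem.List.pyRange 0 (data.length : Int) 8).foldl
    (fun n i => n ++ [PySem.List.slice data (some i) (some (i + 8))]) []
  n.reverse.foldl (fun res i => res ++ i) []

-- ===== PORT B =====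
def data_reverse_alt (data : List Int) : List Int :=
  let n : Int := (data.length : Int)
  (PySem.List.pyRange 0 n 8).foldl
    (fun out s =>
      let e : Int := min (s + 8) n
      -- Python slice assignment out[n-e : n-s] = data[s:e], ported by hand as
      -- out[:n-e] ++ data[s:e] ++ out[n-s:]; exact here since 0 <= n-e <= n-s and the
      -- replacement data[s:e] has exactly the length of the assigned range.
      PySem.List.slice out none (some (n - e)) ++ PySem.List.slice data (some s) (some e)
        ++ PySem.List.slice out (some (n - s)) none)
    (List.replicate data.length 0)

-- ===== PRECONDITION & SPEC =====
def Spec_data_reverse (data : List Int) (out : List Int) : Prop := out = data_reverse_alt data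
instance (data : List Int) (out : List Int) : Decidable (Spec_data_reverse data out) := by unfold Spec_data_reverse; infer_instance

-- ===== CLAIM =====
def Claim_equal_data_reverse : Prop := ∀ (data : List Int), Dom_data_reverse data → Spec_data_reverse data (data_reverse data)

-- ===== LEMMAS AND PROOFS =====
-- common reference function: reversed-chunk concatenation by structural recursion
def pvChunksRev (data : List Int) : List Int :=
  if data = [] then []
  else pvChunksRev (data.drop 8) ++ data.take 8
termination_by data.length
decreasing_by simp_all [List.length_pos_iff]

theorem pv_foldl_snoc (f : Int → List Int) (l : List Int) (init : List (List Int)) :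
    l.foldl (fun n i => n ++ [f i]) init = init ++ l.map f := by
  induction l generalizing init with
  | nil => simp
  | cons x xs ih => simp [List.foldl, ih]

theorem pv_foldl_flat (l : List (List Int)) (init : List Int) :
    l.foldl (fun res i => res ++ i) init = init ++ l.flatten := by
  induction l generalizing init with
  | nil => simp
  | cons x xs ih => simp [List.foldl, ih]

-- A's chunk list, in drop/take form
def pvChunks (data : List Int) : List (List Int) :=
  (List.range ((data.length + 7) / 8)).map (fun k => (data.drop (8 * k)).take 8)

theorem pv_chunks_cons (data : List Int) (h : data ≠ []) :
    pvChunks data = data.take 8 :: pvChunks (data.drop 8) := by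
  have hlen : 0 < data.length := List.length_pos_iff.mpr h
  have hc : (data.length + 7) / 8 = ((data.drop 8).length + 7) / 8 + 1 := by
    simp only [List.length_drop]; omega
  unfold pvChunks
  rw [hc, List.range_succ_eq_map]
  simp only [List.map_cons, List.map_map, Nat.mul_zero, List.drop_zero,
    List.cons.injEq]
  refine ⟨trivial, ?_⟩
  apply List.map_congr_left
  intro k _
  rw [List.drop_drop]
  simp only [Function.comp_apply]
  congr 2
  omega

theorem pv_A_eq_chunks (data : List Int) :
    data_reverse data = (pvChunks data).reverse.flatten := by
  unfold data_reverse pvChunks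
  rw [pv_foldl_snoc, pv_foldl_flat]
  rw [PySem.List.pyRange_of_pos 0 (data.length : Int) (by norm_num)]
  simp only [List.map_map, List.nil_append]
  congr 2
  have hcount : (if (0:Int) < (data.length : Int)
      then (((data.length : Int) - 0 + 8 - 1) / 8).toNat else 0) = (data.length + 7) / 8 := by
    split_ifs with h0
    · have : ((data.length : Int) - 0 + 8 - 1) = ((data.length + 7 : Nat) : Int) := by push_cast; ring
      rw [this]
      omega
    · omega
  rw [hcount]
  apply List.map_congr_left
  intro k _
  simp only [Function.comp_apply]
  have h0 : (0 : Int) ≤ 0 + 8 * (k : Int) := by positivity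
  have h1 : (0 : Int) ≤ 0 + 8 * (k : Int) + 8 := by positivity
  rw [PySem.List.slice_toNat data h0 h1]
  have e1 : ((0 : Int) + 8 * (k : Int)).toNat = 8 * k := by omega
  have e2 : ((0 : Int) + 8 * (k : Int) + 8).toNat = 8 * k + 8 := by omega
  rw [e1, e2]
  congr 1
  omega

theorem pv_A_eq_ref (data : List Int) : data_reverse data = pvChunksRev data := by
  rw [pv_A_eq_chunks]
  induction hn : data.length using Nat.strong_induction_on generalizing data with
  | _ n ih =>
    by_cases h : data = []
    · subst h; unfold pvChunksRev; simp [pvChunks]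
    · rw [pv_chunks_cons data h]; unfold pvChunksRev
      simp only [h, if_false]
      have hlen : 0 < data.length := List.length_pos_iff.mpr h
      have := ih ((data.drop 8).length) (by simp; omega) (data.drop 8) rfl
      simp [this]

theorem pv_chunksRev_nil : pvChunksRev [] = [] := by
  unfold pvChunksRev; simp

theorem pv_chunksRev_small (c : List Int) (hc : c.length ≤ 8) : pvChunksRev c = c := by
  by_cases h : c = []
  · subst h; exact pv_chunksRev_nil
  · conv_lhs => unfold pvChunksRev
    simp only [h, if_false]
    rw [List.drop_eq_nil_of_le hc, List.take_of_length_le hc, pv_chunksRev_nil]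
    simp

theorem pv_chunksRev_snoc (l c : List Int) (h8 : l.length % 8 = 0) (hc : c.length ≤ 8) :
    pvChunksRev (l ++ c) = c ++ pvChunksRev l := by
  induction hn : l.length using Nat.strong_induction_on generalizing l with
  | _ n ih =>
    by_cases hl : l = []
    · subst hl; simp [pv_chunksRev_small c hc, pv_chunksRev_nil]
    · have hlen8 : 8 ≤ l.length := by
        have := List.length_pos_iff.mpr hl; omega
      have h1 : l ++ c ≠ [] := by simp [hl]
      conv_lhs => unfold pvChunksRev
      simp only [h1, if_false]
      rw [List.drop_append, List.take_append]
      have h0 : 8 - l.length = 0 := by omega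
      simp only [h0, List.drop_zero, List.take_zero, List.append_nil]
      rw [ih ((l.drop 8).length) (by simp; omega) (l.drop 8) (by simp; omega) rfl]
      conv_rhs => rw [show pvChunksRev l = pvChunksRev (l.drop 8) ++ l.take 8 by
        conv_lhs => unfold pvChunksRev
        simp [hl]]
      simp [List.append_assoc]

theorem pv_range8 (len : Nat) :
    PySem.List.pyRange 0 (len : Int) 8 = (List.range ((len + 7) / 8)).map (fun k : Nat => (8 : Int) * (k : Int)) := by
  rw [PySem.List.pyRange_of_pos 0 (len : Int) (by norm_num)]
  have hcount : (if (0:Int) < (len : Int)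
      then (((len : Int) - 0 + 8 - 1) / 8).toNat else 0) = (len + 7) / 8 := by
    split_ifs with h0
    · have : ((len : Int) - 0 + 8 - 1) = ((len + 7 : Nat) : Int) := by push_cast; ring
      rw [this]; omega
    · omega
  rw [hcount]
  apply List.map_congr_left
  intro k _
  ring

theorem pv_B_loop (data : List Int) (m : Nat) (hm : m ≤ (data.length + 7) / 8) :
    ((List.range m).map (fun k : Nat => (8 : Int) * (k : Int))).foldl
      (fun out s =>
        let e : Int := min (s + 8) ((data.length : Int))
        PySem.List.slice out none (some ((data.length : Int) - e))
          ++ PySem.List.slice data (some s) (some e)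
          ++ PySem.List.slice out (some ((data.length : Int) - s)) none)
      (List.replicate data.length 0)
    = List.replicate (data.length - min (8 * m) data.length) 0 ++ pvChunksRev (data.take (8 * m)) := by
  induction m with
  | zero => simp [pv_chunksRev_nil]
  | succ m ih =>
    have hm' : m ≤ (data.length + 7) / 8 := by omega
    have h8m : 8 * m < data.length := by omega
    rw [List.range_succ, List.map_append, List.foldl_append, ih hm']
    simp only [List.map_cons, List.map_nil, List.foldl_cons, List.foldl_nil]
    have hmin : min (8 * m) data.length = 8 * m := by omega
    rw [hmin]
    -- abbreviations over Nat
    set L := data.length with hL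
    set eN := min (8 * m + 8) L with heN
    have heNle : eN ≤ L := by omega
    have heNge : 8 * m ≤ eN := by omega
    -- the Int-level e equals the cast of eN
    have hecast : min ((8 : Int) * (m : Int) + 8) ((L : Int)) = ((eN : Nat) : Int) := by
      simp [heN]
    simp only [hecast]
    -- the three slices
    have hs1 : PySem.List.slice
        (List.replicate (L - 8 * m) (0:Int) ++ pvChunksRev (data.take (8 * m)))
        none (some ((L : Int) - (eN : Int))) = List.replicate (L - eN) (0:Int) := by
      rw [show ((L : Int) - (eN : Int)) = (((L - eN : Nat)) : Int) by omega]
      rw [PySem.List.slice_to _ (by positivity)]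
      rw [Int.toNat_natCast]
      rw [List.take_append_of_le_length (by simp; omega)]
      rw [List.take_replicate]
      congr 1
      omega
    have hs2 : PySem.List.slice data (some ((8 : Int) * (m : Int))) (some ((eN : Nat) : Int))
        = (data.drop (8 * m)).take 8 := by
      rw [PySem.List.slice_toNat data (by positivity) (by positivity)]
      rw [show ((8 : Int) * (m : Int)).toNat = 8 * m by omega]
      rw [show ((eN : Nat) : Int).toNat = eN by omega]
      exact List.take_eq_take_iff.mpr (by simp only [List.length_drop]; omega)
    have hs3 : PySem.List.slice
        (List.replicate (L - 8 * m) (0:Int) ++ pvChunksRev (data.take (8 * m)))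
        (some ((L : Int) - (8 : Int) * (m : Int))) none = pvChunksRev (data.take (8 * m)) := by
      rw [PySem.List.slice_from _ (by omega)]
      rw [show ((L : Int) - (8 : Int) * (m : Int)).toNat
            = (List.replicate (L - 8 * m) (0:Int)).length by simp; omega]
      exact List.drop_left
    rw [hs1, hs2, hs3]
    -- fold the RHS chunk structure
    have htake : data.take (8 * (m + 1)) = data.take (8 * m) ++ (data.drop (8 * m)).take 8 := by
      rw [show 8 * (m + 1) = 8 * m + 8 by ring, List.take_add]
    rw [htake, pv_chunksRev_snoc _ _ (by simp; omega) (by simp)]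
    rw [show min (8 * (m + 1)) L = eN by omega]
    simp [List.append_assoc]

theorem pv_B_eq_ref (data : List Int) : data_reverse_alt data = pvChunksRev data := by
  simp only [data_reverse_alt]
  rw [pv_range8 data.length, pv_B_loop data ((data.length + 7) / 8) le_rfl]
  have h : 8 * ((data.length + 7) / 8) ≥ data.length := by omega
  rw [List.take_of_length_le (by omega)]
  rw [show min (8 * ((data.length + 7) / 8)) data.length = data.length by omega]
  simp

-- ===== VERDICT =====
theorem data_reverse_spec : Claim_equal_data_reverse := by
  intro data _
  show data_reverse data = data_reverse_alt data
  rw [pv_A_eq_ref, pv_B_eq_ref]
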